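-- pv_equiv track=rewrite | github.com/kijai/ComfyUI-WanAnimatePreprocess | nodes.py | _has_lower_leg_points
-- ===== SOURCE A (Python) =====
-- def _has_lower_leg_points(refs):
--     if not refs:
--         return False
--
--     right_leg_present = False
--     left_leg_present = False
--
--     for arr_name, idx in refs:
--         if arr_name != "kps_body":
--             continue
--
--         if idx in (9, 10):
--             right_leg_present = True
--         elif idx in (12, 13):
--             left_leg_present = True
--
--         if right_leg_present and left_leg_present:
--             return True
--
--     return right_leg_present and left_leg_present
-- ===== SOURCE B (Python) =====
-- def _has_lower_leg_points(refs):
--     return (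
--         (("kps_body", 9) in refs or ("kps_body", 10) in refs)
--         and (("kps_body", 12) in refs or ("kps_body", 13) in refs)
--     )
-- ===== Notes on version B (the rewrite author's own statement) =====
-- stated objective: simpler
-- what changed: Drops the explicit loop, the name filter, the two mutable flags and the early exit entirely: B is a single boolean expression of four literal tuple-membership queries (("kps_body", k) in refs for k in 9,10,12,13), correct because the loop's flags record exactly whether such a pair occurs anywhere in refs.
import Mathlib
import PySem

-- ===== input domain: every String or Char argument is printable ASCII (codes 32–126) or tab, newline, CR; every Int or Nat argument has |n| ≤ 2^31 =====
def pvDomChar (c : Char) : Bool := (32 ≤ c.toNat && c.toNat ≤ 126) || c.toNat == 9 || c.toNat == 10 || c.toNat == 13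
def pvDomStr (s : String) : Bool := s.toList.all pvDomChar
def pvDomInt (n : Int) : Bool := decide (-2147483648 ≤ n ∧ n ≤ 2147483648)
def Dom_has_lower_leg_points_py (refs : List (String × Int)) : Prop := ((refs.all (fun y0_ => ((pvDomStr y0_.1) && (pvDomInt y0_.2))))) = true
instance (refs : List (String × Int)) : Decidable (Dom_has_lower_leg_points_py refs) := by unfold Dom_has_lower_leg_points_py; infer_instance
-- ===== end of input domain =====

-- B replaces the flagged loop by four literal tuple-membership queries (simpler; return value only).

-- ===== PORT A =====
-- the for-loop over refs with the two flags and the early return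
def hasLegLoopA (rl ll : Bool) : List (String × Int) → Bool
  | [] => rl && ll
  | (arr_name, idx) :: rest =>
    if arr_name != "kps_body" then hasLegLoopA rl ll rest
    else
      let rl' := if idx == 9 || idx == 10 then true else rl
      let ll' := if !(idx == 9 || idx == 10) && (idx == 12 || idx == 13) then true else ll
      if rl' && ll' then true else hasLegLoopA rl' ll' rest

def has_lower_leg_points_py (refs : List (String × Int)) : Bool :=
  if refs.isEmpty then false else hasLegLoopA false false refs

-- ===== PORT B =====
def has_lower_leg_points_py_alt (refs : List (String × Int)) : Bool :=
  (refs.contains ("kps_body", (9 : Int)) || refs.contains ("kps_body", (10 : Int)))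
    && (refs.contains ("kps_body", (12 : Int)) || refs.contains ("kps_body", (13 : Int)))

-- ===== PRECONDITION & SPEC =====
def Spec_has_lower_leg_points_py (refs : List (String × Int)) (out : Bool) : Prop := out = has_lower_leg_points_py_alt refs
instance (refs : List (String × Int)) (out : Bool) : Decidable (Spec_has_lower_leg_points_py refs out) := by unfold Spec_has_lower_leg_points_py; infer_instance

-- ===== CLAIM (what is proved, stated in full; the proofs are below) =====
def Claim_equal_has_lower_leg_points_py : Prop := ∀ (refs : List (String × Int)), Dom_has_lower_leg_points_py refs → Spec_has_lower_leg_points_py refs (has_lower_leg_points_py refs)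

-- ===== LEMMAS AND PROOFS =====

def hasR (refs : List (String × Int)) : Bool :=
  refs.any (fun p => p.1 == "kps_body" && (p.2 == 9 || p.2 == 10))
def hasL (refs : List (String × Int)) : Bool :=
  refs.any (fun p => p.1 == "kps_body" && (p.2 == 12 || p.2 == 13))

theorem hasLegLoopA_eq (refs : List (String × Int)) : ∀ rl ll,
    hasLegLoopA rl ll refs = ((rl || hasR refs) && (ll || hasL refs)) := by
  induction refs with
  | nil => intro rl ll; simp [hasLegLoopA, hasR, hasL]
  | cons p rest ih =>
    intro rl ll
    obtain ⟨name, idx⟩ := p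
    by_cases hn : name = "kps_body"
    · subst hn
      by_cases h9 : idx = 9 ∨ idx = 10
      · by_cases hll : ll = true
        · subst hll
          rcases h9 with h | h <;> subst h <;>
            simp [hasLegLoopA, hasR, hasL] <;> tauto
        · replace hll : ll = false := by cases ll <;> simp_all
          subst hll
          rcases h9 with h | h <;> subst h <;>
            simp [hasLegLoopA, ih, hasR, hasL]
      · by_cases h12 : idx = 12 ∨ idx = 13
        · by_cases hrl : rl = true
          · subst hrl
            rcases h12 with h | h <;> subst h <;>
              simp [hasLegLoopA, hasR, hasL] <;> tauto
          · replace hrl : rl = false := by cases rl <;> simp_all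
            subst hrl
            rcases h12 with h | h <;> subst h <;>
              simp [hasLegLoopA, ih, hasR, hasL]
        · have h9' : (idx == 9 || idx == 10) = false := by
            simp only [Bool.or_eq_false_iff, beq_eq_false_iff_ne]; exact ⟨fun h => h9 (Or.inl h), fun h => h9 (Or.inr h)⟩
          have h12' : (idx == 12 || idx == 13) = false := by
            simp only [Bool.or_eq_false_iff, beq_eq_false_iff_ne]; exact ⟨fun h => h12 (Or.inl h), fun h => h12 (Or.inr h)⟩
          simp [hasLegLoopA, ih, hasR, hasL, h9', h12'] <;> tauto
    · have hn' : (name == "kps_body") = false := by simpa using hn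
      simp [hasLegLoopA, ih, hasR, hasL, hn', hn]

theorem alt_eq (refs : List (String × Int)) :
    has_lower_leg_points_py_alt refs = (hasR refs && hasL refs) := by
  rw [Bool.eq_iff_iff]
  unfold has_lower_leg_points_py_alt hasR hasL
  simp only [Bool.and_eq_true, Bool.or_eq_true, List.contains_iff_mem, List.any_eq_true,
    beq_iff_eq]
  constructor
  · rintro ⟨h9 | h10, h12 | h13⟩
    · exact ⟨⟨_, h9, by simp⟩, ⟨_, h12, by simp⟩⟩
    · exact ⟨⟨_, h9, by simp⟩, ⟨_, h13, by simp⟩⟩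
    · exact ⟨⟨_, h10, by simp⟩, ⟨_, h12, by simp⟩⟩
    · exact ⟨⟨_, h10, by simp⟩, ⟨_, h13, by simp⟩⟩
  · rintro ⟨⟨⟨n, i⟩, hp, hpn, hpi | hpi⟩, ⟨⟨m, j⟩, hq, hqn, hqi | hqi⟩⟩ <;>
      subst hpn hpi hqn hqi <;> tauto
  
-- ===== VERDICT (by name: the statement is the Claim_ definition above) =====
theorem has_lower_leg_points_py_spec : Claim_equal_has_lower_leg_points_py := by
  intro refs _
  unfold Spec_has_lower_leg_points_py has_lower_leg_points_py
  rw [alt_eq, hasLegLoopA_eq]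
  cases refs <;> simp [hasR, hasL]
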